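-- pv_equiv track=rewrite | github.com/PhilLeGoff/hackaton-groupe-12 | data/generators/generate_ner_annotations.py | find_non_overlapping_span
-- ===== SOURCE A (Python) =====
-- def find_non_overlapping_span(text: str, value: str, occupied: list[tuple[int, int]]) -> tuple[int, int] | None:
--     start = 0
--     while True:
--         index = text.find(value, start)
--         if index == -1:
--             return None
--         span = (index, index + len(value))
--         if not any(span[0] < end and span[1] > begin for begin, end in occupied):
--             return span
--         start = index + 1
-- ===== SOURCE B (Python) =====
-- def find_non_overlapping_span(text, value, occupied):
--     m = len(value)
--     for i in range(len(text) - m + 1):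
--         if text[i:i + m] == value and all(i >= end or i + m <= begin
--                                           for begin, end in occupied):
--             return (i, i + m)
--     return None
-- ===== Notes on version B (the rewrite author's own statement) =====
-- stated objective: alternative
-- what changed: Replaced A's restarting while-loop over text.find with a single for-loop over all start positions that tests occurrence by slice comparison and non-overlap by the De Morgan-dual all() predicate.
import Mathlib
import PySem

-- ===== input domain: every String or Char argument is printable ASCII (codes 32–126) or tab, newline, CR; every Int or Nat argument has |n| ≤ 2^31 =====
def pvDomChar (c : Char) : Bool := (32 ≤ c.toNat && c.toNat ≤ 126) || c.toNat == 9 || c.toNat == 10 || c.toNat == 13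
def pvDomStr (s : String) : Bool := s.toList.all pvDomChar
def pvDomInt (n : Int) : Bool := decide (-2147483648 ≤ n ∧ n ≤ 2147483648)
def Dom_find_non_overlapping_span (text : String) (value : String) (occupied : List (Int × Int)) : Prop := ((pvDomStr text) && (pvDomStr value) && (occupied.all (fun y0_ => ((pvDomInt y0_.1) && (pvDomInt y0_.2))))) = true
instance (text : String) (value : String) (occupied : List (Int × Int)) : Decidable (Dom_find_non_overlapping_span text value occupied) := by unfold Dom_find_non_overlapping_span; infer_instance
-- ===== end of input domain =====

-- B replaces A's find/restart while-loop by one scan over all start positions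
-- testing slice equality and the De Morgan-dual all() non-overlap predicate (objective: alternative).

-- ===== PORT A =====
-- A's loop needs this fact of CPython's find quirk for termination: a start past len gives -1.
theorem pvFindFrom_gt_len (s sub : List Char) (k : Nat) (h : s.length < k) :
    PySem.Chars.findFrom s sub (k : Int) none = -1 := by
  simp only [PySem.Chars.findFrom]
  have h0 : ¬ ((k : Int) < 0) := by omega
  rw [if_neg h0, if_pos (by exact_mod_cast h)]

def pvLoopA (t v : List Char) (occ : List (Int × Int)) (start : Nat) : Option (Int × Int) :=
  let index := PySem.Chars.findFrom t v (start : Int) none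
  if h : index = -1 then none
  else
    let span : Int × Int := (index, index + v.length)
    if !(occ.any fun p => decide (span.1 < p.2) && decide (p.1 < span.2)) then some span
    else pvLoopA t v occ (index.toNat + 1)
termination_by t.length + 1 - start
decreasing_by
  have hle : start ≤ t.length := by
    by_contra hgt
    exact h (pvFindFrom_gt_len t v start (by omega))
  have hspec := PySem.Chars.findFrom_natCast_spec t v start hle h
  omega

def find_non_overlapping_span (text : String) (value : String) (occupied : List (Int × Int)) : Option (Int × Int) :=
  pvLoopA text.toList value.toList occupied 0

-- ===== PORT B =====
def pvLoopB (t v : List Char) (occ : List (Int × Int)) : List Int → Option (Int × Int)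
  | [] => none
  | i :: rest =>
    if PySem.List.slice t (some i) (some (i + v.length)) = v
        && occ.all (fun p => decide (p.2 <= i) || decide (i + v.length <= p.1)) then
      some (i, i + v.length)
    else pvLoopB t v occ rest

def find_non_overlapping_span_alt (text : String) (value : String) (occupied : List (Int × Int)) : Option (Int × Int) :=
  pvLoopB text.toList value.toList occupied
    (PySem.List.pyRange 0 ((text.toList.length : Int) - (value.toList.length : Int) + 1) 1)

-- ===== PRECONDITION & SPEC =====
def Spec_find_non_overlapping_span (text : String) (value : String) (occupied : List (Int × Int)) (out : Option (Int × Int)) : Prop := out = find_non_overlapping_span_alt text value occupied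
instance (text : String) (value : String) (occupied : List (Int × Int)) (out : Option (Int × Int)) : Decidable (Spec_find_non_overlapping_span text value occupied out) := by unfold Spec_find_non_overlapping_span; infer_instance

-- ===== CLAIM (what is proved, stated in full; the proofs are below) =====
def Claim_equal_find_non_overlapping_span : Prop := ∀ (text : String) (value : String) (occupied : List (Int × Int)), Dom_find_non_overlapping_span text value occupied → Spec_find_non_overlapping_span text value occupied (find_non_overlapping_span text value occupied)

-- ===== LEMMAS AND PROOFS =====

-- the Bool condition B's loop tests at a candidate index
def pvCondB (t v : List Char) (occ : List (Int × Int)) (i : Int) : Bool :=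
  decide (PySem.List.slice t (some i) (some (i + v.length)) = v)
    && occ.all (fun p => decide (p.2 ≤ i) || decide (i + v.length ≤ p.1))

theorem pvLoopB_cons (t v : List Char) (occ : List (Int × Int)) (i : Int) (rest : List Int) :
    pvLoopB t v occ (i :: rest)
      = if pvCondB t v occ i then some (i, i + v.length) else pvLoopB t v occ rest := rfl

theorem pvLoopB_skip (t v : List Char) (occ : List (Int × Int)) (l1 l2 : List Int)
    (h : ∀ i ∈ l1, pvCondB t v occ i = false) :
    pvLoopB t v occ (l1 ++ l2) = pvLoopB t v occ l2 := by
  induction l1 with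
  | nil => rfl
  | cons a l ih =>
    rw [List.cons_append, pvLoopB_cons, if_neg (by simp [h a List.mem_cons_self])]
    exact ih (fun i hi => h i (List.mem_cons_of_mem a hi))

theorem pvLoopB_none (t v : List Char) (occ : List (Int × Int)) (l : List Int)
    (h : ∀ i ∈ l, pvCondB t v occ i = false) : pvLoopB t v occ l = none := by
  have := pvLoopB_skip t v occ l [] h
  rwa [List.append_nil] at this

-- per-element De Morgan: A's negated any() overlap test equals B's all() test
theorem pvDeMorgan (occ : List (Int × Int)) (i e : Int) :
    (!(occ.any fun p => decide (i < p.2) && decide (p.1 < e)))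
      = occ.all (fun p => decide (p.2 ≤ i) || decide (e ≤ p.1)) := by
  induction occ with
  | nil => rfl
  | cons p rest ih =>
    simp only [List.any_cons, List.all_cons, Bool.not_or, ← ih]
    by_cases h1 : i < p.2 <;> by_cases h2 : p.1 < e <;> simp [h1, h2] <;> omega

-- B's slice test at index k says exactly "v occurs at k"
theorem pvMatch_iff (t v : List Char) (k : Nat) :
    PySem.List.slice t (some (k : Int)) (some ((k : Int) + (v.length : Int))) = v
      ↔ v <+: t.drop k := by
  rw [PySem.List.slice_natCast_add, eq_comm, ← List.prefix_iff_eq_take]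

theorem pvMain (t v : List Char) (occ : List (Int × Int)) (start : Nat)
    (hst : start ≤ t.length + 1) :
    pvLoopA t v occ start
      = pvLoopB t v occ
          (PySem.List.pyRange (start : Int) ((t.length : Int) - (v.length : Int) + 1) 1) := by
  rw [pvLoopA]
  by_cases hst' : start ≤ t.length
  · set j := PySem.Chars.findFrom t v (start : Int) none with hjdef
    by_cases hj : j = -1
    · rw [dif_pos hj]
      have hni : ¬ v <:+: t.drop start :=
        (PySem.Chars.findFrom_natCast_eq_neg_one_iff t v start hst').mp hj
      refine (pvLoopB_none t v occ _ (fun i hi => ?_)).symm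
      obtain ⟨hlo, _⟩ := PySem.List.mem_pyRange_one.mp hi
      have hi0 : 0 ≤ i := le_trans (by exact_mod_cast Nat.zero_le start) hlo
      have hieq : i = ((i.toNat : Nat) : Int) := (Int.toNat_of_nonneg hi0).symm
      rw [pvCondB, Bool.and_eq_false_iff]
      left
      rw [decide_eq_false_iff_not, hieq, pvMatch_iff]
      intro hpre
      apply hni
      have hsl : start ≤ i.toNat := by omega
      have hdd : t.drop i.toNat = (t.drop start).drop (i.toNat - start) := by
        rw [List.drop_drop]; congr 1; omega
      rw [hdd] at hpre
      exact hpre.isInfix.trans (List.drop_suffix _ _).isInfix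
    · rw [dif_neg hj]
      obtain ⟨hj1, hj2, hj3⟩ := PySem.Chars.findFrom_natCast_spec t v start hst' hj
      have hj0 : (0 : Int) ≤ j := le_trans (by exact_mod_cast Nat.zero_le start) hj1
      have hjeq : j = ((j.toNat : Nat) : Int) := (Int.toNat_of_nonneg hj0).symm
      have hjn : j ≤ (t.length : Int) := by
        rw [hjdef, PySem.Chars.findFrom_natCast t v start hst']
        split_ifs with hf
        · omega
        · have h1 := PySem.Chars.find_le_length (t.drop start) v
          rw [List.length_drop] at h1
          omega
      have hjm : j.toNat + v.length ≤ t.length := by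
        have h1 := hj2.length_le
        rw [List.length_drop] at h1
        omega
      have hjb : j < (t.length : Int) - (v.length : Int) + 1 := by omega
      rw [PySem.List.pyRange_one_append (start : Int) j _ hj1 (by omega),
          pvLoopB_skip t v occ _ _ ?hfail, PySem.List.pyRange_one_cons hjb, pvLoopB_cons]
      case hfail =>
        intro i hi
        obtain ⟨hlo, hhi⟩ := PySem.List.mem_pyRange_one.mp hi
        have hi0 : 0 ≤ i := le_trans (by exact_mod_cast Nat.zero_le start) hlo
        have hieq : i = ((i.toNat : Nat) : Int) := (Int.toNat_of_nonneg hi0).symm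
        rw [pvCondB, Bool.and_eq_false_iff]
        left
        rw [decide_eq_false_iff_not, hieq, pvMatch_iff]
        exact hj3 i.toNat (by omega) (by omega)
      have hmatch : pvCondB t v occ j
          = occ.all (fun p => decide (p.2 ≤ j) || decide (j + v.length ≤ p.1)) := by
        rw [pvCondB, decide_eq_true (by rw [hjeq, pvMatch_iff]; exact hj2), Bool.true_and]
      rw [hmatch]
      show (if (!occ.any fun p => decide (j < p.2) && decide (p.1 < j + (v.length : Int))) = true
              then some (j, j + (v.length : Int)) else pvLoopA t v occ (j.toNat + 1)) = _
      rw [pvDeMorgan occ j (j + (v.length : Int))]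
      by_cases hok : occ.all (fun p => decide (p.2 ≤ j) || decide (j + (v.length : Int) ≤ p.1)) = true
      · rw [if_pos hok, if_pos hok]
      · rw [if_neg hok, if_neg hok]
        have hrec := pvMain t v occ (j.toNat + 1) (by omega)
        rw [hrec]
        congr 1
        congr 1
        push_cast
        omega
  · rw [dif_pos (pvFindFrom_gt_len t v start (by omega)),
        PySem.List.pyRange_one_eq_nil (by omega)]
    rfl
termination_by t.length + 1 - start
decreasing_by omega

-- ===== VERDICT (by name: the statement is the Claim_ definition above) =====
theorem find_non_overlapping_span_spec : Claim_equal_find_non_overlapping_span := by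
  intro text value occupied _
  unfold Spec_find_non_overlapping_span find_non_overlapping_span find_non_overlapping_span_alt
  have := pvMain text.toList value.toList occupied 0 (by omega)
  simpa using this
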